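-- pv_equiv track=rewrite | github.com/MianInshaullah/Interview_Prep_HackerRank | python/Busstation.py | solve
-- ===== SOURCE A (Python) =====
-- from itertools import accumulate, filterfalse
--
-- def solve(arr):
--     res = []
--     all_s = list(accumulate(arr))
--     max_s = all_s[-1]
--     for s in all_s:
--         q, r = divmod(max_s, s)
--         if r == 0 and len(set(filterfalse(lambda x: x%s, all_s))) == q:
--             res.append(s)
--     return res
-- ===== SOURCE B (Python) =====
-- def _gcd(a, b):
--     a = abs(a)
--     b = abs(b)
--     while b:
--         a, b = b, a % b
--     return a
--
-- def solve(arr):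
--     sums = []
--     t = 0
--     for x in arr:
--         t += x
--         sums.append(t)
--     gcnt = {}
--     for x in set(sums):
--         g = _gcd(x, t)
--         gcnt[g] = gcnt.get(g, 0) + 1
--     res = []
--     for s in sums:
--         q, r = divmod(t, s)
--         if r == 0 and sum(c for g, c in gcnt.items() if g % s == 0) == q:
--             res.append(s)
--     return res
-- ===== Notes on version B (the rewrite author's own statement) =====
-- stated objective: alternative
-- what changed: B groups the distinct prefix sums by gcd(x, total) into a counter built once, and decides each candidate s by summing the counter entries whose key s divides (valid since s | total makes s | x equivalent to s | gcd(x, total)), instead of A's per-candidate rebuild of a filtered set over the whole prefix-sum list.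
import Mathlib
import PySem

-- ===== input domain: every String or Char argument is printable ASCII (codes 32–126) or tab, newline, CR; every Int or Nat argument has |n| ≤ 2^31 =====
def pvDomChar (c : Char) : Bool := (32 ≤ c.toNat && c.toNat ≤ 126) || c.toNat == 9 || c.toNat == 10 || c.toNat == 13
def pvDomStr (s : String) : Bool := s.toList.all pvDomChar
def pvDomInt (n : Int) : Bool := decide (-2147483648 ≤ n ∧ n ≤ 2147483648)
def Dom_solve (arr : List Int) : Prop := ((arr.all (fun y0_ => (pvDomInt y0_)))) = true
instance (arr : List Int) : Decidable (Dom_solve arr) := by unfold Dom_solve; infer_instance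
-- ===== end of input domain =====

-- B groups the distinct prefix sums by gcd(x, total) into a counter built once and decides each
-- candidate s by summing the counter entries whose key s divides (valid because s | total makes
-- s | x equivalent to s | gcd(x, total)), instead of A's per-candidate rebuild of a filtered set
-- over the whole prefix-sum list; objective: alternative (no measured speedup claimed).

-- shared helper: the running prefix sums (A: itertools.accumulate; B: the explicit t += x loop),
-- as a fold carrying (running total, list so far)
def prefixSums (arr : List Int) : Int × List Int :=
  arr.foldl (fun (st : Int × List Int) x => (st.1 + x, st.2 ++ [st.1 + x])) ((0 : Int), ([] : List Int))

-- ===== PORT A =====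
def solve (arr : List Int) : List Int :=
  let all_s := (prefixSums arr).2
  let max_s := (PySem.List.pyGet? all_s (-1)).getD 0    -- all_s[-1]; raises on empty arr, excluded by Pre_
  all_s.foldl (fun res s =>
    match PySem.Int.divmod? max_s s with                -- none = ZeroDivisionError, excluded by Pre_
    | none => res
    | some (q, r) =>
      if r = 0 ∧ PySem.Set.len (PySem.Set.ofList (all_s.filter (fun x => decide (PySem.Int.mod x s = 0)))) = q
      then res ++ [s] else res) []

-- ===== PORT B =====
-- Source B's hand-rolled Euclid loop (while b: a, b = b, a % b), on the absolute values
def pyGcd (a b : Nat) : Nat :=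
  if b = 0 then a else pyGcd b (a % b)
decreasing_by exact Nat.mod_lt _ (Nat.pos_of_ne_zero (by assumption))

def solve_alt (arr : List Int) : List Int :=
  let st := prefixSums arr
  let t := st.1
  let sums := st.2
  let gs := (PySem.Set.ofList sums).map (fun x => (pyGcd x.natAbs t.natAbs : Int))   -- gcd(x, t) per distinct prefix sum
  let gcnt := gs.foldl (fun (d : PySem.Dict Int Int) g => d.insert g (d.getD g 0 + 1)) PySem.Dict.empty
  sums.foldl (fun res s =>
    match PySem.Int.divmod? t s with                    -- none = ZeroDivisionError, excluded by Pre_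
    | none => res
    | some (q, r) =>
      if r = 0 ∧ ((gcnt.items.filter (fun gc => decide (PySem.Int.mod gc.1 s = 0))).map (fun gc => gc.2)).sum = q
      then res ++ [s] else res) []

-- ===== PRECONDITION & SPEC =====
-- Pre_ excludes exactly the inputs where A raises: the empty list (IndexError on all_s[-1])
-- and arrays with a zero prefix sum (ZeroDivisionError in divmod(max_s, s)).
def Pre_solve (arr : List Int) : Prop :=
  arr ≠ [] ∧ ∀ n : Nat, n < arr.length → (arr.take (n + 1)).sum ≠ 0
instance (arr : List Int) : Decidable (Pre_solve arr) := by unfold Pre_solve; infer_instance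

def pvWitness_solve : List Int := [1, 2, 3]

def Spec_solve (arr : List Int) (out : List Int) : Prop := out = solve_alt arr
instance (arr : List Int) (out : List Int) : Decidable (Spec_solve arr out) := by unfold Spec_solve; infer_instance

-- ===== CLAIM (what is proved, stated in full; the proofs are below) =====
def Claim_equal_solve : Prop := ∀ (arr : List Int), Dom_solve arr → Pre_solve arr → Spec_solve arr (solve arr)

-- ===== LEMMAS AND PROOFS =====

-- structural description of the prefix-sum list: running sums starting from c
def prefixFrom (c : Int) : List Int → List Int
  | [] => []
  | x :: xs => (c + x) :: prefixFrom (c + x) xs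

theorem prefixSums_foldl (arr : List Int) : ∀ (c : Int) (out : List Int),
    arr.foldl (fun (st : Int × List Int) x => (st.1 + x, st.2 ++ [st.1 + x])) (c, out)
      = (c + arr.sum, out ++ prefixFrom c arr) := by
  induction arr with
  | nil => intro c out; simp [prefixFrom]
  | cons x xs ih =>
    intro c out
    simp only [List.foldl_cons, ih, prefixFrom, List.sum_cons, List.append_assoc,
      List.singleton_append]
    rw [add_assoc]

theorem prefixSums_eq (arr : List Int) : prefixSums arr = (arr.sum, prefixFrom 0 arr) := by
  simp [prefixSums, prefixSums_foldl]

theorem mem_prefixFrom {s c : Int} {arr : List Int} (h : s ∈ prefixFrom c arr) :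
    ∃ n : Nat, n < arr.length ∧ s = c + (arr.take (n + 1)).sum := by
  induction arr generalizing c with
  | nil => simp [prefixFrom] at h
  | cons x xs ih =>
    simp only [prefixFrom, List.mem_cons] at h
    rcases h with h | h
    · exact ⟨0, by simp, by simpa using h⟩
    · obtain ⟨n, hn, hs⟩ := ih h
      exact ⟨n + 1, by simpa using Nat.succ_lt_succ hn, by simp [hs]; ring⟩

theorem mem_prefixSums_ne_zero {arr : List Int} (hpre : Pre_solve arr) {s : Int}
    (h : s ∈ prefixFrom 0 arr) : s ≠ 0 := by
  obtain ⟨n, hn, hs⟩ := mem_prefixFrom h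
  have := hpre.2 n hn
  omega

theorem getLast?_prefixFrom (arr : List Int) : ∀ c : Int, arr ≠ [] →
    (prefixFrom c arr).getLast? = some (c + arr.sum) := by
  induction arr with
  | nil => intro c h; exact absurd rfl h
  | cons x xs ih =>
    intro c _
    cases xs with
    | nil => simp [prefixFrom]
    | cons y ys =>
      have hne : (y :: ys) ≠ [] := by simp
      have hstep : prefixFrom c (x :: y :: ys) = (c + x) :: prefixFrom (c + x) (y :: ys) := rfl
      have hstep2 : prefixFrom (c + x) (y :: ys) = (c + x + y) :: prefixFrom (c + x + y) ys := rfl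
      rw [hstep, hstep2, List.getLast?_cons_cons, ← hstep2, ih (c + x) hne]
      congr 1
      simp [List.sum_cons]
      ring

theorem pyGet?_neg_one {xs : List Int} (h : xs ≠ []) :
    PySem.List.pyGet? xs (-1) = xs.getLast? := by
  have hl : 0 < xs.length := List.length_pos_iff.mpr h
  simp only [PySem.List.pyGet?, PySem.List.pyIdx?]
  rw [if_neg (by norm_num), if_pos (by omega)]
  simp [List.getLast?_eq_getElem?]

-- PySem.Set.ofList commutes with filter (keep-first dedup of a filtered list)
theorem foldl_add_filter (p : Int → Bool) (l : List Int) : ∀ acc : List Int,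
    (l.filter p).foldl PySem.Set.add (acc.filter p) = (l.foldl PySem.Set.add acc).filter p := by
  induction l with
  | nil => intro acc; simp
  | cons x xs ih =>
    intro acc
    by_cases hp : p x
    · have hc : (acc.filter p).contains x = acc.contains x := by
        by_cases hmem : x ∈ acc
        · have h1 : x ∈ acc.filter p := List.mem_filter.mpr ⟨hmem, hp⟩
          have e1 : acc.contains x = true := by simpa using hmem
          have e2 : (acc.filter p).contains x = true := by simpa using h1
          rw [e1, e2]
        · have h1 : x ∉ acc.filter p := fun h => hmem (List.mem_filter.mp h).1
          have e1 : acc.contains x = false := by simpa using hmem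
          have e2 : (acc.filter p).contains x = false := by simpa using h1
          rw [e1, e2]
      simp only [List.filter_cons, hp, if_pos, List.foldl_cons]
      have : PySem.Set.add (acc.filter p) x = (PySem.Set.add acc x).filter p := by
        simp only [PySem.Set.add, PySem.Set.contains, hc]
        by_cases hmem : x ∈ acc
        · have e1 : acc.contains x = true := by simpa using hmem
          simp only [e1]; simp
        · have e1 : acc.contains x = false := by simpa using hmem
          simp only [e1]; simp [List.filter_append, hp]
      rw [this, ih]
    · simp only [List.filter_cons, hp, List.foldl_cons]
      have : (PySem.Set.add acc x).filter p = acc.filter p := by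
        simp only [PySem.Set.add, PySem.Set.contains]
        by_cases hmem : x ∈ acc
        · have e1 : acc.contains x = true := by simpa using hmem
          simp only [e1]; simp
        · have e1 : acc.contains x = false := by simpa using hmem
          simp only [e1]; simp [List.filter_append, hp]
      simp [← this, ih]

theorem ofList_filter (p : Int → Bool) (l : List Int) :
    PySem.Set.ofList (l.filter p) = (PySem.Set.ofList l).filter p := by
  have := foldl_add_filter p l []
  simpa [PySem.Set.ofList, PySem.Set.empty] using this

-- Source B's Euclid loop computes the (nonnegative) gcd
theorem pyGcd_eq_gcd (a b : Nat) : pyGcd a b = Nat.gcd a b := by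
  by_cases hb : b = 0
  · rw [pyGcd, if_pos hb, hb, Nat.gcd_zero_right]
  · rw [pyGcd, if_neg hb, pyGcd_eq_gcd b (a % b)]
    rw [Nat.gcd_comm a b, Nat.gcd_rec b a]
    exact (Nat.gcd_comm _ _)
decreasing_by exact Nat.mod_lt _ (Nat.pos_of_ne_zero hb)

-- for s | t: s divides x iff s divides gcd(x, t)
theorem pv_dvd_gcd_iff {s t : Int} (x : Int) (hst : s ∣ t) :
    s ∣ ((Int.gcd x t : Nat) : Int) ↔ s ∣ x := by
  constructor
  · intro h; exact h.trans (Int.gcd_dvd_left x t)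
  · intro h
    rw [← Int.natAbs_dvd] at h hst ⊢
    exact Int.natCast_dvd_natCast.mpr (Int.dvd_gcd h hst)

-- Σ over a nodup list of keys, all satisfying p and covering the p-elements of G, of G's counts = countP p G
theorem sum_counts_of_nodup (p : Int → Bool) (G : List Int) : ∀ (D : List Int),
    D.Nodup → (∀ k ∈ D, p k = true) → (∀ x ∈ G, p x = true → x ∈ D) →
    (D.map (fun k => (G.count k : Int))).sum = (G.countP p : Int) := by
  induction G with
  | nil => intro D _ _ _; simp
  | cons x G ih =>
    intro D hnd hall hcov
    have hrec := ih D hnd hall (fun y hy => hcov y (List.mem_cons_of_mem _ hy))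
    have hsplit : (D.map (fun k => ((x :: G).count k : Int))).sum
        = (D.map (fun k => (G.count k : Int))).sum
          + (D.map (fun k => if k = x then (1 : Int) else 0)).sum := by
      rw [← PySem.List.sum_map_add_int]
      congr 1
      apply List.map_congr_left
      intro k _
      rw [List.count_cons]
      by_cases hkx : k = x <;> simp [hkx, Ne.symm]
    have hind : (D.map (fun k => if k = x then (1 : Int) else 0)).sum
        = if x ∈ D then 1 else 0 := by
      clear hall hcov hrec hsplit
      induction D with
      | nil => simp
      | cons d D ihD =>
        have hnd' := (List.nodup_cons.mp hnd).2
        by_cases hdx : d = x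
        · subst hdx
          have : d ∉ D := (List.nodup_cons.mp hnd).1
          have hz : (D.map (fun k => if k = d then (1 : Int) else 0)).sum = 0 := by
            rw [ihD hnd']
            simp [this]
          simp [hz]
        · simp only [List.map_cons, List.sum_cons, if_neg hdx, ihD hnd', zero_add,
            List.mem_cons]
          simp [Ne.symm hdx]
    rw [hsplit, hrec, hind, List.countP_cons]
    by_cases hpx : p x = true
    · have : x ∈ D := hcov x (List.mem_cons_self) hpx
      simp [hpx, this]
    · have : x ∉ D := fun hm => hpx (hall x hm)
      simp [hpx, this]

-- B's filtered item-sum over the gcd-counter is the divisible-count over G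
theorem sum_items_counter (p : Int → Bool) (G : List Int) :
    (((PySem.Dict.counter G).items.filter (fun gc : Int × Int => p gc.1)).map (fun gc => gc.2)).sum
      = (G.countP p : Int) := by
  rw [PySem.Dict.items_counter, List.filter_map, List.map_map]
  have : ((fun gc : Int × Int => gc.2) ∘ fun k => (k, (G.count k : Int)))
      = fun k => (G.count k : Int) := rfl
  rw [this]
  apply sum_counts_of_nodup p G
  · exact (PySem.Set.nodup_ofList G).filter _
  · intro k hk
    simpa using (List.mem_filter.mp hk).2
  · intro x hx hpx
    exact List.mem_filter.mpr ⟨(PySem.Set.mem_ofList G x).mpr hx, by simpa using hpx⟩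

-- ===== VERDICT (by name: the statement is the Claim_ definition above) =====
theorem solve_spec : Claim_equal_solve := by
  intro arr _ hpre
  unfold Spec_solve solve solve_alt
  rw [prefixSums_eq]
  dsimp only
  set L := prefixFrom 0 arr with hL
  set t := arr.sum with ht
  have htA : (PySem.List.pyGet? L (-1)).getD 0 = t := by
    rw [pyGet?_neg_one (by
      cases harr : arr with
      | nil => exact absurd harr hpre.1
      | cons a l => simp [hL, harr, prefixFrom]),
      getLast?_prefixFrom arr 0 hpre.1]
    simp [ht]
  rw [htA]
  have hne : ∀ s ∈ L, s ≠ 0 := fun s hs => mem_prefixSums_ne_zero hpre hs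
  have hgcnt : (((PySem.Set.ofList L).map (fun x => (pyGcd x.natAbs t.natAbs : Int))).foldl
      (fun (d : PySem.Dict Int Int) g => d.insert g (d.getD g 0 + 1)) PySem.Dict.empty)
      = PySem.Dict.counter ((PySem.Set.ofList L).map (fun x => (Int.gcd x t : Int))) := by
    rw [PySem.Dict.foldl_insert_getD_add_one_eq_counter]
    congr 1
    apply List.map_congr_left
    intro x _
    rw [pyGcd_eq_gcd]
    rfl
  rw [hgcnt]
  set G := (PySem.Set.ofList L).map (fun x => (Int.gcd x t : Int)) with hG
  -- both folds reduce candidate-by-candidate: the two per-candidate conditions agree on L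
  apply PySem.List.foldl_congr_mem
  intro res s hs
  have hs0 := hne s hs
  have hdm : PySem.Int.divmod? t s = some (PySem.Int.floordiv t s, PySem.Int.mod t s) := by
    simp [PySem.Int.divmod?, hs0, PySem.Int.floordiv, PySem.Int.mod]
  rw [hdm]
  by_cases hmod : PySem.Int.mod t s = 0
  · have hst : s ∣ t := (PySem.Int.mod_eq_zero_iff_dvd t s).mp hmod
    have heq : PySem.Set.len (PySem.Set.ofList (L.filter (fun x => decide (PySem.Int.mod x s = 0))))
        = (((PySem.Dict.counter G).items.filter (fun gc => decide (PySem.Int.mod gc.1 s = 0))).map (fun gc => gc.2)).sum := by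
      have hA : PySem.Set.len (PySem.Set.ofList (L.filter (fun x => decide (PySem.Int.mod x s = 0))))
          = ((PySem.Set.ofList L).countP (fun x => decide (PySem.Int.mod x s = 0)) : Int) := by
        rw [ofList_filter]
        simp [PySem.Set.len, List.countP_eq_length_filter]
      have hB : (((PySem.Dict.counter G).items.filter (fun gc => decide (PySem.Int.mod gc.1 s = 0))).map (fun gc => gc.2)).sum
          = (G.countP (fun g => decide (PySem.Int.mod g s = 0)) : Int) :=
        sum_items_counter (fun g => decide (PySem.Int.mod g s = 0)) G
      rw [hA, hB, hG, List.countP_map]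
      congr 2
      funext x
      simp only [Function.comp]
      congr 1
      rw [PySem.Int.mod_eq_zero_iff_dvd, PySem.Int.mod_eq_zero_iff_dvd]
      exact propext (pv_dvd_gcd_iff x hst).symm
    rw [heq]
  · simp [hmod]
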